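-- pv_equiv track=rewrite | github.com/viyanta/viyanta_web | backend/test_extraction/icici_test.py | compute_ranges_from_index
-- ===== SOURCE A (Python) =====
-- def compute_ranges_from_index(forms, total_pages):
--     """Compute start and end pages for each form from index, inferring end_page as next form's start_page-1."""
--     # Remove duplicates, keep first occurrence
--     seen = set()
--     unique_forms = []
--     for code, start, end in forms:
--         if code not in seen:
--             unique_forms.append((code, start, end))
--             seen.add(code)
--     # Sort by start page
--     unique_forms.sort(key=lambda x: x[1])
--     ranges = []
--     for i, (code, start, end) in enumerate(unique_forms):
--         if end is not None:
--             ranges.append((code, start, end))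
--         else:
--             # Infer end_page as next form's start_page-1
--             if i < len(unique_forms) - 1:
--                 next_start = unique_forms[i+1][1]
--                 inferred_end = max(start, next_start - 1)
--             else:
--                 inferred_end = total_pages
--             ranges.append((code, start, inferred_end))
--     return ranges
-- ===== SOURCE B (Python) =====
-- def compute_ranges_from_index(forms, total_pages):
--     """Compute start and end pages for each form from index, inferring end_page as next form's start_page-1."""
--     # Keep-first dedup by form code.
--     first = {}
--     for code, start, end in forms:
--         if code not in first:
--             first[code] = (start, end)
--     # Bucket the unique forms by start page (first-occurrence order inside each bucket).
--     groups = {}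
--     for code, (start, end) in first.items():
--         groups.setdefault(start, []).append((code, end))
--     # Walk the distinct start pages in increasing order; a missing end page is the
--     # current page when another form starts on it, else the page before the next
--     # distinct start page, else the last page of the document.
--     result = []
--     starts = sorted(groups)
--     for gi, s in enumerate(starts):
--         grp = groups[s]
--         for j, (code, end) in enumerate(grp):
--             if end is not None:
--                 result.append((code, s, end))
--             elif j < len(grp) - 1:
--                 result.append((code, s, s))
--             elif gi < len(starts) - 1:
--                 result.append((code, s, starts[gi + 1] - 1))
--             else:
--                 result.append((code, s, total_pages))
--     return result
-- ===== Notes on version B (the rewrite author's own statement) =====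
-- stated objective: alternative
-- what changed: Instead of sorting the deduplicated tuples and scanning them with an i+1 lookahead and max(), B buckets the unique forms by start page in a dict, sorts only the distinct start pages, and resolves missing ends per bucket: the same page for non-last bucket members, the next distinct start minus one for a bucket's last member, total_pages for the final bucket.
import Mathlib
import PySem

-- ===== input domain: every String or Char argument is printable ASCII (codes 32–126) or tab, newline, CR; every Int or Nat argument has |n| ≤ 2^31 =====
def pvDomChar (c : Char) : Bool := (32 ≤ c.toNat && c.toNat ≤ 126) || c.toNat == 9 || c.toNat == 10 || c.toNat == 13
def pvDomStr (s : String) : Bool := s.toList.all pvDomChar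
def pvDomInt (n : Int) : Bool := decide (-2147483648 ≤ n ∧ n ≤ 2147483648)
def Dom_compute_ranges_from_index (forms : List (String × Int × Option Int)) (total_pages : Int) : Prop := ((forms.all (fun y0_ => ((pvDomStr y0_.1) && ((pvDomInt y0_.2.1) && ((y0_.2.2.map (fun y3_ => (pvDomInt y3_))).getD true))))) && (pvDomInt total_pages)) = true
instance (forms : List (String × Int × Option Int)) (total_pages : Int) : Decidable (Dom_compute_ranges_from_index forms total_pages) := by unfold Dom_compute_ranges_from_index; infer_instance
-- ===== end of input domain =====

-- B replaces A's sort-all-tuples-then-lookahead scan by a group-by algorithm: it buckets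
-- the unique forms by start page, sorts only the distinct start pages, and resolves missing
-- end pages per bucket; objective: alternative decomposition (no speed claim).

-- ===== PORT A =====
def compute_ranges_from_index (forms : List (String × Int × Option Int)) (total_pages : Int) : List (String × Int × Int) :=
  -- seen/unique_forms dedup loop
  let st := forms.foldl
    (fun (st : PySem.Set String × List (String × Int × Option Int)) f =>
      if PySem.Set.contains st.1 f.1 then st
      else (PySem.Set.add st.1 f.1, st.2 ++ [f]))
    (PySem.Set.empty, [])
  -- unique_forms.sort(key=lambda x: x[1])
  let uf := PySem.List.sorted st.2 (fun x => x.2.1)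
  -- for i, (code, start, end) in enumerate(unique_forms)
  (PySem.List.enumerate uf).foldl
    (fun ranges p =>
      match p.2.2.2 with
      | some e => ranges ++ [(p.2.1, p.2.2.1, e)]
      | none =>
        let inferred :=
          if p.1 < (uf.length : Int) - 1 then
            match PySem.List.pyGet? uf (p.1 + 1) with
            | some nxt => max p.2.2.1 (nxt.2.1 - 1)
            | none => 0   -- unreachable: guarded by the bound check
          else total_pages
        ranges ++ [(p.2.1, p.2.2.1, inferred)])
    []

-- ===== PORT B =====
def compute_ranges_from_index_alt (forms : List (String × Int × Option Int)) (total_pages : Int) : List (String × Int × Int) :=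
  -- first: keep-first dedup by code ('if code not in first: first[code] = (start, end)')
  let first := forms.foldl
    (fun (d : PySem.Dict String (Int × Option Int)) f =>
      if d.contains f.1 then d else d.insert f.1 (f.2.1, f.2.2))
    PySem.Dict.empty
  -- groups: bucket by start page ('groups.setdefault(start, []).append((code, end))')
  let groups := first.items.foldl
    (fun (g : PySem.Dict Int (List (String × Option Int))) kv =>
      g.modify kv.2.1 [] (fun l => l ++ [(kv.1, kv.2.2)]))
    PySem.Dict.empty
  -- starts = sorted(groups)
  let starts := PySem.List.sorted groups.keys (fun x => x)
  -- for gi, s in enumerate(starts): for j, (code, end) in enumerate(groups[s]):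
  (PySem.List.enumerate starts).foldl
    (fun result q =>
      let grp := groups.getD q.2 []
      (PySem.List.enumerate grp).foldl
        (fun res r =>
          match r.2.2 with
          | some e => res ++ [(r.2.1, q.2, e)]
          | none =>
            if r.1 < (grp.length : Int) - 1 then
              res ++ [(r.2.1, q.2, q.2)]
            else if q.1 < (starts.length : Int) - 1 then
              res ++ [(r.2.1, q.2,
                (match PySem.List.pyGet? starts (q.1 + 1) with
                 | some ns => ns - 1
                 | none => 0))]   -- unreachable: guarded by the bound check
            else
              res ++ [(r.2.1, q.2, total_pages)])
        result)
    []

-- ===== PRECONDITION & SPEC =====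
def Spec_compute_ranges_from_index (forms : List (String × Int × Option Int)) (total_pages : Int) (out : List (String × Int × Int)) : Prop := out = compute_ranges_from_index_alt forms total_pages
instance (forms : List (String × Int × Option Int)) (total_pages : Int) (out : List (String × Int × Int)) : Decidable (Spec_compute_ranges_from_index forms total_pages out) := by unfold Spec_compute_ranges_from_index; infer_instance

-- ===== CLAIM (what is proved, stated in full; the proofs are below) =====
def Claim_equal_compute_ranges_from_index : Prop := ∀ (forms : List (String × Int × Option Int)) (total_pages : Int), Dom_compute_ranges_from_index forms total_pages → Spec_compute_ranges_from_index forms total_pages (compute_ranges_from_index forms total_pages)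

-- ===== LEMMAS AND PROOFS =====

/-- The resolved end page of a form, given the following form's start page (if any). -/
def resolveEnd (tp start : Int) (e ns : Option Int) : Int :=
  match e with
  | some v => v
  | none =>
    match ns with
    | some n => max start (n - 1)
    | none => tp

/-- Reference shape of A's inference pass over the sorted unique list. -/
def refRanges (tp : Int) : List (String × Int × Option Int) → List (String × Int × Int)
  | [] => []
  | f :: rest => (f.1, f.2.1, resolveEnd tp f.2.1 f.2.2 (rest.head?.map (·.2.1))) :: refRanges tp rest

/-- A's per-element result, as a function of the absolute index. -/
def outA (uf : List (String × Int × Option Int)) (tp : Int) (p : Int × (String × Int × Option Int)) : String × Int × Int :=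
  (p.2.1, p.2.2.1,
    match p.2.2.2 with
    | some e => e
    | none =>
      if p.1 < (uf.length : Int) - 1 then
        match PySem.List.pyGet? uf (p.1 + 1) with
        | some nxt => max p.2.2.1 (nxt.2.1 - 1)
        | none => 0
      else tp)

/-- A's dedup loop and B's dedup dict build the same unique list (items ↔ tuples). -/
theorem dedup_eq (forms : List (String × Int × Option Int)) :
    ∀ (seen : PySem.Set String) (acc : List (String × Int × Option Int))
      (d : PySem.Dict String (Int × Option Int)),
      seen = acc.map (·.1) →
      d.items = acc.map (fun t => (t.1, (t.2.1, t.2.2))) →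
      (forms.foldl
        (fun (st : PySem.Set String × List (String × Int × Option Int)) f =>
          if PySem.Set.contains st.1 f.1 then st
          else (PySem.Set.add st.1 f.1, st.2 ++ [f])) (seen, acc)).2
      = ((forms.foldl
          (fun (d : PySem.Dict String (Int × Option Int)) f =>
            if d.contains f.1 then d else d.insert f.1 (f.2.1, f.2.2)) d).items).map
          (fun kv => (kv.1, kv.2.1, kv.2.2)) := by
  induction forms with
  | nil =>
    intro seen acc d hseen hitems
    simp [hitems]
  | cons f forms ih =>
    intro seen acc d hseen hitems
    have hc : PySem.Set.contains seen f.1 = d.contains f.1 := by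
      rw [PySem.Dict.contains_eq_decide_mem_keys, hseen]
      simp [PySem.Dict.keys, hitems]
    by_cases h : d.contains f.1 = true
    · simp only [List.foldl_cons, hc, h, if_true]
      exact ih seen acc d hseen hitems
    · have h' : d.contains f.1 = false := by simpa using h
      simp only [List.foldl_cons, hc, h', if_false, Bool.false_eq_true]
      have hsf : PySem.Set.contains seen f.1 = false := by rw [hc, h']
      apply ih
      · have hnot : f.1 ∉ seen := fun hm => by simp at hsf; exact hsf hm
        simp [PySem.Set.add, hseen]
        intro x x1 hmem
        exact hnot (by rw [hseen]; exact List.mem_map.2 ⟨_, hmem, rfl⟩)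
      · rw [PySem.Dict.items_insert_of_not_contains (h := h'), hitems]
        simp

/-- A's enumerate loop is `refRanges` on the sorted unique list. -/
theorem mapA_eq (tp : Int) :
    ∀ (rest pre : List (String × Int × Option Int)),
      (PySem.List.enumerate rest (pre.length : Int)).map (outA (pre ++ rest) tp)
      = refRanges tp rest := by
  intro rest
  induction rest with
  | nil => intro pre; simp [PySem.List.enumerate, refRanges]
  | cons f rest ih =>
    intro pre
    rw [PySem.List.enumerate_cons, List.map_cons]
    have htail : (PySem.List.enumerate rest ((pre.length : Int) + 1)).map (outA (pre ++ f :: rest) tp)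
        = refRanges tp rest := by
      have := ih (pre ++ [f])
      simpa [List.append_assoc, Nat.cast_add] using this
    rw [htail, refRanges]
    congr 1
    show outA (pre ++ f :: rest) tp ((pre.length : Int), f) = _
    unfold outA resolveEnd
    cases he : f.2.2 with
    | some v => rfl
    | none =>
      simp only
      cases rest with
      | nil => simp
      | cons g rest' =>
        have hget : PySem.List.pyGet? (pre ++ f :: g :: rest') ((pre.length : Int) + 1)
            = some g := by
          have : ((pre.length : Int) + 1) = ((pre.length + 1 : Nat) : Int) := by push_cast; ring
          rw [this, PySem.List.pyGet?_natCast]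
          rw [List.getElem?_append_right (by omega)]
          simp
        simp [hget]

/-- `insertBy` lands between the groups with key ≤ key x and those with key > key x. -/
theorem insertBy_flatMap {α : Type} (key : α → Int) (x : α) (g : Int → List α) :
    ∀ (K : List Int), K.Pairwise (· < ·) →
      (∀ s ∈ K, ∀ y ∈ g s, key y = s) →
      PySem.List.insertBy (fun a b => decide (key a < key b)) x (K.flatMap g)
      = (K.filter (fun s => decide (s ≤ key x))).flatMap g
        ++ x :: (K.filter (fun s => decide (key x < s))).flatMap g := by
  intro K
  induction K with
  | nil => intro _ _; simp [PySem.List.insertBy]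
  | cons k K ih =>
    intro hK hg
    by_cases hk : k ≤ key x
    · -- walk through the whole group g k, then recurse
      have hskip : ∀ y ∈ g k, (fun a b => decide (key a < key b)) x y = false := by
        intro y hy
        have := hg k (by simp) y hy
        simp [this]; omega
      have hstep : ∀ (ys zs : List α), (∀ y ∈ ys, (fun a b => decide (key a < key b)) x y = false) →
          PySem.List.insertBy (fun a b => decide (key a < key b)) x (ys ++ zs)
          = ys ++ PySem.List.insertBy (fun a b => decide (key a < key b)) x zs := by
        intro ys
        induction ys with
        | nil => intro zs _; simp
        | cons y ys ihy =>
          intro zs hys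
          have hy : decide (key x < key y) = false := hys y (by simp)
          simp only [List.cons_append, PySem.List.insertBy, hy]
          cases hzs : ys ++ zs with
          | nil => simp_all
          | cons a l =>
            simp only [Bool.false_eq_true, if_false]
            rw [← hzs, ihy zs (fun y hy => hys y (by simp [hy]))]
      rw [List.flatMap_cons, hstep _ _ hskip,
        ih hK.of_cons (fun s hs => hg s (by simp [hs]))]
      have hkf : decide (k ≤ key x) = true := by simp [hk]
      have hkf2 : decide (key x < k) = false := by simp; omega
      simp [hkf, hkf2]
    · -- x goes in front: every remaining element has key > key x
      have hall : ∀ y ∈ (k :: K).flatMap g, (fun a b => decide (key a < key b)) x y = true := by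
        intro y hy
        rcases List.mem_flatMap.1 hy with ⟨s, hs, hys⟩
        have hkey := hg s hs y hys
        have hks : k ≤ s := by
          rcases hs with _ | hs
          · omega
          · have := (List.pairwise_cons.1 hK).1 s (by assumption)
            omega
        simp [hkey]; omega
      have hfront : PySem.List.insertBy (fun a b => decide (key a < key b)) x ((k :: K).flatMap g)
          = x :: (k :: K).flatMap g := by
        cases hfl : (k :: K).flatMap g with
        | nil => simp [PySem.List.insertBy]
        | cons a l =>
          have ha := hall a (by rw [hfl]; simp)
          simp only [PySem.List.insertBy, ha, if_true]
      rw [hfront]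
      have h1 : ∀ s ∈ (k :: K), decide (s ≤ key x) = false := by
        intro s hs
        rcases hs with _ | hs
        · simp; omega
        · have := (List.pairwise_cons.1 hK).1 s (by assumption)
          simp; omega
      have h2 : ∀ s ∈ (k :: K), decide (key x < s) = true := by
        intro s hs
        have := h1 s hs
        simp at this ⊢; omega
      rw [List.filter_eq_nil_iff.2 (by intro s hs; simp only [h1 s hs]; simp),
        List.filter_eq_self.2 h2]
      simp

/-- Splice one element's bucket update into the flatMap over sorted distinct keys. -/
theorem flat_splice {α : Type} (x : α) (c : Int) (g g' : Int → List α) :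
    ∀ (K : List Int), K.Pairwise (· < ·) → c ∈ K →
      (∀ s ∈ K, g' s = g s ++ (if s = c then [x] else [])) →
      K.flatMap g'
      = (K.filter (fun s => decide (s ≤ c))).flatMap g
        ++ x :: (K.filter (fun s => decide (c < s))).flatMap g := by
  intro K
  induction K with
  | nil => intro _ hc _; simp at hc
  | cons k K ih =>
    intro hK hc hgg
    by_cases hkc : k = c
    · subst hkc
      have hgt : ∀ s ∈ K, k < s := (List.pairwise_cons.1 hK).1
      have h1 : decide (k ≤ k) = true := by simp
      have h2 : decide (k < k) = false := by simp
      have hKle : K.filter (fun s => decide (s ≤ k)) = [] :=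
        List.filter_eq_nil_iff.2 (by intro s hs; have := hgt s hs; simp; omega)
      have hKgt : K.filter (fun s => decide (k < s)) = K :=
        List.filter_eq_self.2 (by intro s hs; have := hgt s hs; simp; omega)
      have hgK : K.flatMap g' = K.flatMap g := by
        apply List.flatMap_congr
        intro s hs
        have hne : s ≠ k := by have := hgt s hs; omega
        simpa [hne] using hgg s (by simp [hs])
      rw [List.flatMap_cons, hgK, List.filter_cons, List.filter_cons, h1, h2]
      simp only [if_true, Bool.false_eq_true, if_false, hKle, hKgt]
      have := hgg k (by simp)
      simp [this]
    · have hcK : c ∈ K := by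
        rcases List.mem_cons.1 hc with h | h
        · exact absurd h.symm hkc
        · exact h
      have hklt : k < c := by
        have := (List.pairwise_cons.1 hK).1 c hcK; omega
      have h1 : decide (k ≤ c) = true := by simp; omega
      have h2 : decide (c < k) = false := by simp; omega
      have hgk : g' k = g k := by
        have := hgg k (by simp)
        simpa [hkc] using this
      rw [List.flatMap_cons, hgk, List.filter_cons, List.filter_cons, h1, h2]
      simp only [if_true, Bool.false_eq_true, if_false]
      rw [ih hK.of_cons hcK (fun s hs => hgg s (by simp [hs]))]
      simp

/-- STABLE-SORT GROUPING: sorting by key equals concatenating, over the distinct keys in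
increasing order, the elements with that key in original order. -/
theorem sorted_groups {α : Type} (key : α → Int) (u : List α) :
    PySem.List.sorted u key
    = (PySem.List.sorted (PySem.Set.ofList (u.map key)) (fun x => x)).flatMap
        (fun s => u.filter (fun t => key t == s)) := by
  induction u using List.reverseRecOn with
  | nil => simp [PySem.List.sorted, PySem.Set.ofList, PySem.Set.empty]
  | append_singleton u x ih =>
    have hsorted : PySem.List.sorted (u ++ [x]) key
        = PySem.List.insertBy (fun a b => decide (key a < key b)) x (PySem.List.sorted u key) := by
      rw [PySem.List.sorted_eq_foldl_insertBy, PySem.List.sorted_eq_foldl_insertBy, List.foldl_append]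
      simp
    set K := PySem.List.sorted (PySem.Set.ofList (u.map key)) (fun x => x) with hKdef
    have hK : K.Pairwise (· < ·) := PySem.List.sorted_ofList_pairwise_lt _
    have hg : ∀ s ∈ K, ∀ y ∈ u.filter (fun t => key t == s), key y = s := by
      intro s _ y hy
      have := List.of_mem_filter hy
      simpa using this
    rw [hsorted, ih,
      insertBy_flatMap key x (fun s => u.filter (fun t => key t == s)) K hK hg]
    -- now identify the right-hand side for u ++ [x]
    have hset : PySem.Set.ofList ((u ++ [x]).map key)
        = PySem.Set.add (PySem.Set.ofList (u.map key)) (key x) := by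
      simp [PySem.Set.ofList]
    have hfilter : ∀ s, (u ++ [x]).filter (fun t => key t == s)
        = u.filter (fun t => key t == s) ++ (if s = key x then [x] else []) := by
      intro s
      rw [List.filter_append]
      congr 1
      by_cases h : s = key x
      · subst h; simp
      · simp [Ne.symm h, h]
    by_cases hmem : key x ∈ u.map key
    · -- the key is already present: same key list, x appended to its bucket
      have hcont : PySem.Set.contains (PySem.Set.ofList (u.map key)) (key x) = true :=
        (PySem.Set.contains_iff _ _).2 ((PySem.Set.mem_ofList _ _).2 hmem)
      have hK' : PySem.Set.ofList ((u ++ [x]).map key) = PySem.Set.ofList (u.map key) := by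
        rw [hset, PySem.Set.add, if_pos hcont]
      rw [hK']
      have hcK : key x ∈ K := by
        rw [hKdef, PySem.List.mem_sorted]
        exact (PySem.Set.mem_ofList _ _).2 hmem
      exact (flat_splice x (key x) (fun s => u.filter (fun t => key t == s))
        (fun s => (u ++ [x]).filter (fun t => key t == s)) K hK hcK
        (fun s _ => hfilter s)).symm
    · -- a fresh key: it is inserted between the smaller and the larger keys
      have hcont : PySem.Set.contains (PySem.Set.ofList (u.map key)) (key x) = false := by
        by_contra h
        have h' : PySem.Set.contains (PySem.Set.ofList (u.map key)) (key x) = true := by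
          cases hcc : PySem.Set.contains (PySem.Set.ofList (u.map key)) (key x)
          · exact absurd hcc h
          · rfl
        exact hmem ((PySem.Set.mem_ofList _ _).1 ((PySem.Set.contains_iff _ _).1 h'))
      have hsetadd : PySem.Set.ofList ((u ++ [x]).map key)
          = PySem.Set.ofList (u.map key) ++ [key x] := by
        rw [hset, PySem.Set.add, if_neg (by rw [hcont]; exact Bool.false_ne_true)]
      have hnotK : key x ∉ K := by
        rw [hKdef, PySem.List.mem_sorted]
        intro h
        exact absurd ((PySem.Set.mem_ofList _ _).1 h) hmem
      -- the new sorted key list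
      have hK'eq : PySem.List.sorted (PySem.Set.ofList ((u ++ [x]).map key)) (fun x => x)
          = K.filter (fun s => decide (s ≤ key x)) ++ key x :: K.filter (fun s => decide (key x < s)) := by
        apply PySem.List.sorted_eq_of_perm_of_pairwise_lt
        · rw [hsetadd]
          have hperm1 : (K.filter (fun s => decide (s ≤ key x)) ++ K.filter (fun s => decide (key x < s))).Perm K := by
            have hfp := List.filter_append_perm (fun s => decide (s ≤ key x)) K
            have hcongr : K.filter (fun s => !decide (s ≤ key x)) = K.filter (fun s => decide (key x < s)) := by
              apply List.filter_congr
              intro s _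
              by_cases h : s ≤ key x
              · have h2 : ¬ key x < s := by omega
                simp [h, h2]
              · have h2 : key x < s := by omega
                simp [h, h2]
            rwa [hcongr] at hfp
          have hpermK : K.Perm (PySem.Set.ofList (u.map key)) := PySem.List.sorted_perm _ _ _
          have h1 : (K.filter (fun s => decide (s ≤ key x)) ++ key x :: K.filter (fun s => decide (key x < s))).Perm
              (key x :: (K.filter (fun s => decide (s ≤ key x)) ++ K.filter (fun s => decide (key x < s)))) :=
            List.perm_middle
          have h2 : (key x :: (K.filter (fun s => decide (s ≤ key x)) ++ K.filter (fun s => decide (key x < s)))).Perm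
              (key x :: PySem.Set.ofList (u.map key)) := (hperm1.trans hpermK).cons _
          have h3 : (key x :: PySem.Set.ofList (u.map key)).Perm (PySem.Set.ofList (u.map key) ++ [key x]) := by
            simpa using (List.perm_middle (a := key x) (l₁ := PySem.Set.ofList (u.map key)) (l₂ := ([] : List Int))).symm
          exact (h1.trans h2).trans h3
        · apply List.pairwise_append.2
          refine ⟨hK.sublist List.filter_sublist, ?_, ?_⟩
          · apply List.pairwise_cons.2
            refine ⟨?_, hK.sublist List.filter_sublist⟩
            intro s hs
            have := List.of_mem_filter hs
            simp at this; omega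
          · intro a ha b hb
            have ha' := List.of_mem_filter ha
            have haK := List.mem_of_mem_filter ha
            have hane : a ≠ key x := fun h => hnotK (h ▸ haK)
            simp at ha'
            rcases List.mem_cons.1 hb with hb | hb
            · subst hb; omega
            · have := List.of_mem_filter hb
              simp at this; omega
      rw [hK'eq]
      rw [List.flatMap_append, List.flatMap_cons]
      have hx : (u ++ [x]).filter (fun t => key t == key x) = [x] := by
        rw [hfilter (key x), if_pos rfl]
        have hnil : u.filter (fun t => key t == key x) = [] := by
          apply List.filter_eq_nil_iff.2
          intro t ht hkt
          exact hmem (by simp at hkt; exact hkt ▸ List.mem_map_of_mem ht)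
        rw [hnil, List.nil_append]
      rw [hx]
      have hrest : ∀ (L : List Int), (∀ s ∈ L, s ∈ K) →
          L.flatMap (fun s => (u ++ [x]).filter (fun t => key t == s))
          = L.flatMap (fun s => u.filter (fun t => key t == s)) := by
        intro L hL
        apply List.flatMap_congr
        intro s hs
        have hne : s ≠ key x := fun h => hnotK (h ▸ hL s hs)
        rw [hfilter s, if_neg hne, List.append_nil]
      rw [hrest _ (fun s hs => List.mem_of_mem_filter hs),
        hrest _ (fun s hs => List.mem_of_mem_filter hs)]
      simp

/-- Reference shape of one bucket of B's output: every member of the bucket starts on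
page `s`; a missing end is `s` except for the bucket's last member, where it is `bnd`. -/
def seg (s bnd : Int) : List (String × Option Int) → List (String × Int × Int)
  | [] => []
  | t :: rest =>
    (t.1, s,
      match t.2 with
      | some e => e
      | none => match rest with
        | _ :: _ => s
        | [] => bnd) :: seg s bnd rest

/-- Reference shape of B's outer loop over the sorted distinct start pages. -/
def refG (tp : Int) (gp : Int → List (String × Option Int)) : List Int → List (String × Int × Int)
  | [] => []
  | s :: K =>
    seg s (match K.head? with | some s' => s' - 1 | none => tp) (gp s) ++ refG tp gp K

/-- B's inner loop body as a function of the enumerated element. -/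
def innerF (tp : Int) (starts : List Int) (q : Int × Int) (grplen : Int)
    (r : Int × String × Option Int) : String × Int × Int :=
  match r.2.2 with
  | some e => (r.2.1, q.2, e)
  | none =>
    if r.1 < grplen - 1 then (r.2.1, q.2, q.2)
    else if q.1 < (starts.length : Int) - 1 then
      (r.2.1, q.2,
        (match PySem.List.pyGet? starts (q.1 + 1) with
         | some ns => ns - 1
         | none => 0))
    else (r.2.1, q.2, tp)

/-- B's inner enumerate loop is `seg`. -/
theorem inner_eq (tp s : Int) (starts : List Int) (gi bnd : Int)
    (hbnd : bnd = if gi < (starts.length : Int) - 1 then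
        (match PySem.List.pyGet? starts (gi + 1) with
         | some ns => ns - 1
         | none => 0)
      else tp) :
    ∀ (l pre : List (String × Option Int)),
      (PySem.List.enumerate l (pre.length : Int)).map
        (innerF tp starts (gi, s) (((pre ++ l).length : Int)))
      = seg s bnd l := by
  intro l
  induction l with
  | nil => intro pre; simp [PySem.List.enumerate, seg]
  | cons t l ih =>
    intro pre
    rw [PySem.List.enumerate_cons, List.map_cons]
    have htail := ih (pre ++ [t])
    rw [show ((pre ++ [t]).length : Int) = (pre.length : Int) + 1 by simp,
      show (pre ++ [t]) ++ l = pre ++ t :: l by simp] at htail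
    rw [htail]
    simp only [seg]
    congr 1
    unfold innerF
    cases he : t.2 with
    | some v => simp
    | none =>
      simp only
      cases l with
      | nil =>
        have hno : ¬ ((pre.length : Int) < ((pre ++ [t]).length : Int) - 1) := by simp
        rw [if_neg hno, hbnd]
        by_cases h : gi < (starts.length : Int) - 1 <;> simp [h]
      | cons w l' =>
        have hyes : (pre.length : Int) < ((pre ++ t :: w :: l').length : Int) - 1 := by
          simp; omega
        rw [if_pos hyes]

/-- B's outer enumerate loop (in map form) is `refG`. -/
theorem outer_eq (tp : Int) (gp : Int → List (String × Option Int)) :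
    ∀ (K pre : List Int),
      (PySem.List.enumerate K (pre.length : Int)).flatMap
        (fun q => (PySem.List.enumerate (gp q.2)).map
          (innerF tp (pre ++ K) q ((gp q.2).length : Int)))
      = refG tp gp K := by
  intro K
  induction K with
  | nil => intro pre; simp [PySem.List.enumerate, refG]
  | cons s K ih =>
    intro pre
    rw [PySem.List.enumerate_cons, List.flatMap_cons]
    have htail := ih (pre ++ [s])
    rw [show ((pre ++ [s]).length : Int) = (pre.length : Int) + 1 by simp,
      show (pre ++ [s]) ++ K = pre ++ s :: K by simp] at htail
    rw [htail, refG]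
    congr 1
    set bnd : Int := (match K.head? with | some s' => s' - 1 | none => tp) with hbnddef
    have hbnd : bnd = if (pre.length : Int) < (((pre ++ s :: K).length : Int)) - 1 then
        (match PySem.List.pyGet? (pre ++ s :: K) ((pre.length : Int) + 1) with
         | some ns => ns - 1
         | none => 0)
      else tp := by
      cases hKc : K with
      | nil => simp [hbnddef, hKc]
      | cons s' K' =>
        have hlt : (pre.length : Int) < (((pre ++ s :: s' :: K').length : Int)) - 1 := by
          simp; omega
        have hget : PySem.List.pyGet? (pre ++ s :: s' :: K') ((pre.length : Int) + 1) = some s' := by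
          have hcast : ((pre.length : Int) + 1) = ((pre.length + 1 : Nat) : Int) := by push_cast; ring
          rw [hcast, PySem.List.pyGet?_natCast, List.getElem?_append_right (by omega)]
          simp
        simp [hbnddef, hKc, hget]
    have := inner_eq tp s (pre ++ s :: K) (pre.length : Int) bnd hbnd (gp s) []
    simpa using this

/-- A fold that only appends one element per step pulls its accumulator out front. -/
theorem inner_fold_pull (tp : Int) (starts : List Int) (q : Int × Int) (grp : List (String × Option Int))
    (acc : List (String × Int × Int)) :
    (PySem.List.enumerate grp).foldl
      (fun res r =>
        match r.2.2 with
        | some e => res ++ [(r.2.1, q.2, e)]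
        | none =>
          if r.1 < (grp.length : Int) - 1 then
            res ++ [(r.2.1, q.2, q.2)]
          else if q.1 < (starts.length : Int) - 1 then
            res ++ [(r.2.1, q.2,
              (match PySem.List.pyGet? starts (q.1 + 1) with
               | some ns => ns - 1
               | none => 0))]
          else
            res ++ [(r.2.1, q.2, tp)])
      acc
    = acc ++ (PySem.List.enumerate grp).map (innerF tp starts q (grp.length : Int)) := by
  rw [← PySem.List.foldl_append_singleton_eq_map]
  apply PySem.List.foldl_congr_mem
  intro res r _
  unfold innerF
  cases r.2.2 with
  | some v => rfl
  | none =>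
    by_cases h1 : r.1 < (grp.length : Int) - 1
    · simp [h1]
    · by_cases h2 : q.1 < (starts.length : Int) - 1 <;> simp [h1, h2]

/-- A's reference entries for one bucket (with the next bucket's start `nxt` after it)
equal B's `seg` for that bucket. -/
theorem refA_seg (tp s bnd : Int) (nxt : Option Int)
    (hlink : (nxt = none ∧ bnd = tp) ∨ ∃ s', nxt = some s' ∧ s < s' ∧ bnd = s' - 1) :
    ∀ (l : List (String × Int × Option Int)) (ys : List (String × Int × Option Int)),
      (∀ t ∈ l, t.2.1 = s) →
      (ys.head?.map (·.2.1)) = nxt →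
      refRanges tp (l ++ ys) = seg s bnd (l.map (fun t => (t.1, t.2.2))) ++ refRanges tp ys := by
  intro l
  induction l with
  | nil => intro ys _ _; simp [seg]
  | cons t l ih =>
    intro ys hl hys
    rw [List.cons_append, refRanges, List.map_cons]
    simp only [seg]
    rw [List.cons_append]
    have hts : t.2.1 = s := hl t (by simp)
    congr 1
    · congr 1
      rw [hts]
      congr 1
      unfold resolveEnd
      cases he : t.2.2 with
      | some v => rfl
      | none =>
        simp only
        cases l with
        | cons w l' =>
          have hws : w.2.1 = s := hl w (by simp)
          simp [hws]
        | nil =>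
          simp only [List.nil_append]
          rcases hlink with ⟨h1, h2⟩ | ⟨s', h1, h2, h3⟩
          · rw [h1] at hys
            cases hy : ys with
            | nil => simp [h2]
            | cons a l2 => rw [hy] at hys; simp at hys
          · rw [h1] at hys
            cases hy : ys with
            | nil => rw [hy] at hys; simp at hys
            | cons a l2 =>
              rw [hy] at hys
              simp at hys
              simp [hys, h3]
              omega
    · exact ih ys (fun t ht => hl t (by simp [ht])) hys

/-- B's grouped reference equals A's reference on the flattened bucket list. -/
theorem refG_eq_refRanges (tp : Int) (g : Int → List (String × Int × Option Int)) :
    ∀ (K : List Int), K.Pairwise (· < ·) →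
      (∀ s ∈ K, ∀ t ∈ g s, t.2.1 = s) →
      (∀ s ∈ K, g s ≠ []) →
      refG tp (fun s => (g s).map (fun t => (t.1, t.2.2))) K
      = refRanges tp (K.flatMap g) := by
  intro K
  induction K with
  | nil => intro _ _ _; simp [refG, refRanges]
  | cons s K ih =>
    intro hK hg hne
    rw [refG, List.flatMap_cons]
    have htail := ih hK.of_cons (fun s hs => hg s (by simp [hs])) (fun s hs => hne s (by simp [hs]))
    set bnd : Int := (match K.head? with | some s' => s' - 1 | none => tp) with hbnddef
    have hlink : ((K.flatMap g).head?.map (·.2.1) = none ∧ bnd = tp)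
        ∨ ∃ s', (K.flatMap g).head?.map (·.2.1) = some s' ∧ s < s' ∧ bnd = s' - 1 := by
      cases hKc : K with
      | nil => left; simp [hbnddef, hKc]
      | cons s' K' =>
        right
        refine ⟨s', ?_, ?_, by simp [hbnddef, hKc]⟩
        · have hne' : g s' ≠ [] := hne s' (by simp [hKc])
          cases hgc : g s' with
          | nil => exact absurd hgc hne'
          | cons a l =>
            have ha : a.2.1 = s' := hg s' (by simp [hKc]) a (by simp [hgc])
            simp [List.flatMap_cons, hgc, ha]
        · exact (List.pairwise_cons.1 hK).1 s' (by simp [hKc])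
    rw [refA_seg tp s bnd ((K.flatMap g).head?.map (·.2.1)) hlink (g s) (K.flatMap g)
      (hg s (by simp)) rfl, htail]

/-- The two ports agree everywhere. -/
theorem compute_eq (forms : List (String × Int × Option Int)) (tp : Int) :
    compute_ranges_from_index forms tp = compute_ranges_from_index_alt forms tp := by
  set u := (forms.foldl
    (fun (st : PySem.Set String × List (String × Int × Option Int)) f =>
      if PySem.Set.contains st.1 f.1 then st
      else (PySem.Set.add st.1 f.1, st.2 ++ [f]))
    (PySem.Set.empty, [])).2 with hudef
  set d := forms.foldl
    (fun (d : PySem.Dict String (Int × Option Int)) f =>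
      if d.contains f.1 then d else d.insert f.1 (f.2.1, f.2.2))
    PySem.Dict.empty with hddef
  have hitems : d.items.map (fun kv => (kv.1, kv.2.1, kv.2.2)) = u := by
    rw [hudef, hddef,
      dedup_eq forms PySem.Set.empty [] PySem.Dict.empty (by simp [PySem.Set.empty])
        (by rw [show (PySem.Dict.empty : PySem.Dict String (Int × Option Int)) = PySem.Dict.mk [] from rfl]; rfl)]
  set grd := d.items.foldl
    (fun (g : PySem.Dict Int (List (String × Option Int))) kv =>
      g.modify kv.2.1 [] (fun l => l ++ [(kv.1, kv.2.2)]))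
    PySem.Dict.empty with hgrddef
  have hgrd_u : grd = u.foldl
      (fun (g : PySem.Dict Int (List (String × Option Int))) t =>
        g.modify t.2.1 [] (fun l => l ++ [(t.1, t.2.2)]))
      PySem.Dict.empty := by
    rw [hgrddef, ← hitems, List.foldl_map]
  set g : Int → List (String × Int × Option Int) := fun s => u.filter (fun t => t.2.1 == s) with hgdef
  have hgetD : ∀ s, grd.getD s [] = (g s).map (fun t => (t.1, t.2.2)) := by
    intro s
    rw [hgrd_u,
      show (u.foldl
        (fun (gg : PySem.Dict Int (List (String × Option Int))) t =>
          gg.modify t.2.1 [] (fun l => l ++ [(t.1, t.2.2)]))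
        PySem.Dict.empty)
      = ((u.map (fun t => (t.2.1, (t.1, t.2.2)))).foldl
        (fun (gg : PySem.Dict Int (List (String × Option Int))) p =>
          gg.modify p.1 [] (fun l => l ++ [p.2]))
        PySem.Dict.empty) by rw [List.foldl_map]]
    rw [PySem.Dict.getD_foldl_modify_append]
    simp [hgdef, List.filter_map, Function.comp_def]
  have hkeys : grd.keys = PySem.Set.ofList (u.map (fun t => t.2.1)) := by
    rw [hgrd_u, PySem.Dict.keys_foldl_modify_key u (fun t => t.2.1) []
      (fun gg t => (fun l => l ++ [(t.1, t.2.2)])) PySem.Dict.empty]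
    rfl
  set K := PySem.List.sorted (PySem.Set.ofList (u.map (fun t => t.2.1))) (fun x => x) with hKdef
  have hKpw : K.Pairwise (· < ·) := PySem.List.sorted_ofList_pairwise_lt _
  have hg : ∀ s ∈ K, ∀ t ∈ g s, t.2.1 = s := by
    intro s _ t ht
    have := List.of_mem_filter ht
    simpa using this
  have hne : ∀ s ∈ K, g s ≠ [] := by
    intro s hs
    have hmem : s ∈ u.map (fun t => t.2.1) := by
      have := (PySem.List.mem_sorted _ _ _ _).1 hs
      exact (PySem.Set.mem_ofList _ _).1 this
    rcases List.mem_map.1 hmem with ⟨t, ht, hts⟩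
    intro hnil
    have : t ∈ g s := List.mem_filter.2 ⟨ht, by simp [hts]⟩
    rw [hnil] at this
    simp at this
  -- A's side: A = refRanges tp (sorted u by start)
  have hA : compute_ranges_from_index forms tp
      = refRanges tp (PySem.List.sorted u (fun x => x.2.1)) := by
    show (PySem.List.enumerate (PySem.List.sorted u (fun x => x.2.1))).foldl _ [] = _
    set uf := PySem.List.sorted u (fun x => x.2.1) with hufdef
    have hbody : (PySem.List.enumerate uf).foldl
        (fun ranges p =>
          match p.2.2.2 with
          | some e => ranges ++ [(p.2.1, p.2.2.1, e)]
          | none =>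
            let inferred :=
              if p.1 < (uf.length : Int) - 1 then
                match PySem.List.pyGet? uf (p.1 + 1) with
                | some nxt => max p.2.2.1 (nxt.2.1 - 1)
                | none => 0
              else tp
            ranges ++ [(p.2.1, p.2.2.1, inferred)]) []
        = (PySem.List.enumerate uf).foldl (fun ranges p => ranges ++ [outA uf tp p]) [] := by
      apply PySem.List.foldl_congr_mem
      intro ranges p _
      rcases p with ⟨i, c, st, e⟩
      cases e <;> rfl
    rw [hbody, PySem.List.foldl_append_singleton_eq_map]
    have := mapA_eq tp uf []
    simpa using this
  have hgroup : PySem.List.sorted u (fun x => x.2.1) = K.flatMap g :=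
    sorted_groups (fun t => t.2.1) u
  -- B's side
  have hB : compute_ranges_from_index_alt forms tp
      = refG tp (fun s => (g s).map (fun t => (t.1, t.2.2))) K := by
    show (PySem.List.enumerate (PySem.List.sorted grd.keys (fun x => x))).foldl _ [] = _
    rw [hkeys, ← hKdef]
    have hpull : ∀ (result : List (String × Int × Int)) (q : Int × Int), q ∈ PySem.List.enumerate K →
        (PySem.List.enumerate (grd.getD q.2 [])).foldl
          (fun res r =>
            match r.2.2 with
            | some e => res ++ [(r.2.1, q.2, e)]
            | none =>
              if r.1 < ((grd.getD q.2 []).length : Int) - 1 then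
                res ++ [(r.2.1, q.2, q.2)]
              else if q.1 < ((K.length : Int)) - 1 then
                res ++ [(r.2.1, q.2,
                  (match PySem.List.pyGet? K (q.1 + 1) with
                   | some ns => ns - 1
                   | none => 0))]
              else
                res ++ [(r.2.1, q.2, tp)])
          result
        = result ++ (PySem.List.enumerate ((g q.2).map (fun t => (t.1, t.2.2)))).map
            (innerF tp K q (((g q.2).map (fun t => (t.1, t.2.2))).length : Int)) := by
      intro result q _
      rw [hgetD q.2]
      exact inner_fold_pull tp K q ((g q.2).map (fun t => (t.1, t.2.2))) result
    have hfinal : (PySem.List.enumerate K).foldl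
        (fun (result : List (String × Int × Int)) q =>
          (PySem.List.enumerate (grd.getD q.2 [])).foldl
            (fun res r =>
              match r.2.2 with
              | some e => res ++ [(r.2.1, q.2, e)]
              | none =>
                if r.1 < ((grd.getD q.2 []).length : Int) - 1 then
                  res ++ [(r.2.1, q.2, q.2)]
                else if q.1 < ((K.length : Int)) - 1 then
                  res ++ [(r.2.1, q.2,
                    (match PySem.List.pyGet? K (q.1 + 1) with
                     | some ns => ns - 1
                     | none => 0))]
                else
                  res ++ [(r.2.1, q.2, tp)])
            result) []
        = refG tp (fun s => (g s).map (fun t => (t.1, t.2.2))) K := by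
      refine Eq.trans (PySem.List.foldl_congr_mem
        (l := PySem.List.enumerate K)
        (g := fun result q => result ++ (PySem.List.enumerate ((g q.2).map (fun t => (t.1, t.2.2)))).map
          (innerF tp K q (((g q.2).map (fun t => (t.1, t.2.2))).length : Int)))
        (fun (result : List (String × Int × Int)) q =>
          (PySem.List.enumerate (grd.getD q.2 [])).foldl
            (fun res r =>
              match r.2.2 with
              | some e => res ++ [(r.2.1, q.2, e)]
              | none =>
                if r.1 < ((grd.getD q.2 []).length : Int) - 1 then
                  res ++ [(r.2.1, q.2, q.2)]
                else if q.1 < ((K.length : Int)) - 1 then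
                  res ++ [(r.2.1, q.2,
                    (match PySem.List.pyGet? K (q.1 + 1) with
                     | some ns => ns - 1
                     | none => 0))]
                else
                  res ++ [(r.2.1, q.2, tp)])
            result)
        [] hpull) ?_
      rw [PySem.List.foldl_append_eq_flatMap]
      have := outer_eq tp (fun s => (g s).map (fun t => (t.1, t.2.2))) K []
      simpa using this
    exact hfinal
  rw [hA, hgroup, hB]
  exact (refG_eq_refRanges tp g K hKpw hg hne).symm

-- ===== VERDICT (by name: the statement is the Claim_ definition above) =====
theorem compute_ranges_from_index_spec : Claim_equal_compute_ranges_from_index := by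
  intro forms tp _
  unfold Spec_compute_ranges_from_index
  exact compute_eq forms tp
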